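-- pv_equiv track=rewrite | github.com/BlueFlakes/RogGame | game_core.py | create_first_board
-- ===== SOURCE A (Python) =====
-- def create_first_board(width, height, sign):
--     board = []
--     for row in range(height):
--         item_in_row = []
--
--         for column in range(width-1):
--             if row == 0 or row == (height - 1):
--                 item_in_row.append("#")
--             else:
--                 if column == 0 or column == 150 or column == 198:
--                     item_in_row.append("#")
--                 else:
--                     item_in_row.append(sign)
--         board.append(item_in_row)
--
--     return board
-- ===== SOURCE B (Python) =====
-- def create_first_board(width, height, sign):
--     if height <= 0:
--         return []
--     n = max(width - 1, 0)
--     border = ["#"] * n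
--     if height == 1:
--         return [border]
--     def seg(a, b):
--         return [sign] * max(min(n, b) - a, 0)
--     interior = ((["#"] if n > 0 else [])
--                 + seg(1, 150)
--                 + (["#"] if n > 150 else [])
--                 + seg(151, 198)
--                 + (["#"] if n > 198 else [])
--                 + seg(199, n))
--     return [border] + [list(interior) for _ in range(height - 2)] + [border]
-- ===== Notes on version B (the rewrite author's own statement) =====
-- stated objective: alternative
-- what changed: B computes each interior row as a closed-form concatenation of replicated sign-segments separated by the three wall cells, and the board as border + replicated interior + border, eliminating both the per-cell conditional scan and the per-row loop.
import Mathlib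
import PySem

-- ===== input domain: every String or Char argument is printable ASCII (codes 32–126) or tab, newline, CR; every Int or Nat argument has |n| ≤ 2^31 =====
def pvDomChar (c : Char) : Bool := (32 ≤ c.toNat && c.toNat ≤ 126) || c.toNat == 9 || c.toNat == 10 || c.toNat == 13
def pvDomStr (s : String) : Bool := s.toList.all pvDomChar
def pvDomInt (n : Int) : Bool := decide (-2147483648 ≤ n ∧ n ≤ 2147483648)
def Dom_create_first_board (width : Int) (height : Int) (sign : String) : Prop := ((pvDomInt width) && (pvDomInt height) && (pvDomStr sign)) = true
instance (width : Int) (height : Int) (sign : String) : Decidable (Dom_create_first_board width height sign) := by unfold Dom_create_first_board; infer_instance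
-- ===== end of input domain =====

-- B assembles each interior row as a closed-form concatenation of wall/sign segments and the
-- board as border ++ replicated interior ++ border, with no per-cell or per-row scanning.

-- ===== PORT A =====
def create_first_board (width : Int) (height : Int) (sign : String) : List (List String) :=
  (PySem.List.pyRange 0 height 1).foldl (fun board row =>
    board ++ [(PySem.List.pyRange 0 (width - 1) 1).foldl (fun item_in_row column =>
      if row == 0 || row == height - 1 then item_in_row ++ ["#"]
      else if column == 0 || column == 150 || column == 198 then item_in_row ++ ["#"]
      else item_in_row ++ [sign]) []]) []

-- ===== PORT B =====
-- seg(a, b) = [sign] * max(min(n, b) - a, 0)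
def pvSeg (n : Int) (sign : String) (a b : Int) : List String :=
  List.replicate (max (min n b - a) 0).toNat sign

def pvInterior (n : Int) (sign : String) : List String :=
  (if 0 < n then ["#"] else []) ++ pvSeg n sign 1 150 ++
  (if 150 < n then ["#"] else []) ++ pvSeg n sign 151 198 ++
  (if 198 < n then ["#"] else []) ++ pvSeg n sign 199 n

def create_first_board_alt (width : Int) (height : Int) (sign : String) : List (List String) :=
  if height ≤ 0 then []
  else
    let n := max (width - 1) 0
    let border := List.replicate n.toNat "#"
    if height == 1 then [border]
    else [border] ++ List.replicate (height - 2).toNat (pvInterior n sign) ++ [border]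

-- ===== PRECONDITION & SPEC =====
def Spec_create_first_board (width : Int) (height : Int) (sign : String) (out : List (List String)) : Prop := out = create_first_board_alt width height sign
instance (width : Int) (height : Int) (sign : String) (out : List (List String)) : Decidable (Spec_create_first_board width height sign out) := by unfold Spec_create_first_board; infer_instance

-- ===== CLAIM (what is proved, stated in full; the proofs are below) =====
def Claim_equal_create_first_board : Prop := ∀ (width : Int) (height : Int) (sign : String), Dom_create_first_board width height sign → Spec_create_first_board width height sign (create_first_board width height sign)

-- ===== LEMMAS AND PROOFS =====

-- A's border row (append "#" per column) is a replicated row.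
theorem pv_border_row (width : Int) :
    (PySem.List.pyRange 0 (width - 1) 1).foldl (fun r (_ : Int) => r ++ ["#"]) [] =
      List.replicate (max (width - 1) 0).toNat "#" := by
  rw [PySem.List.foldl_append_singleton_eq_map (f := fun _ => "#")]
  simp only [List.nil_append]
  rw [List.eq_replicate_iff]
  constructor
  · simp [PySem.List.length_pyRange_one]; omega
  · intro b hb; simp at hb; exact hb.2

-- a pyRange segment on which f is constant maps to a replicated block
theorem pv_map_const (a b : Int) (f : Int → String) (v : String)
    (h : ∀ c, a ≤ c → c < b → f c = v) :
    (PySem.List.pyRange a b 1).map f = List.replicate (b - a).toNat v := by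
  rw [List.eq_replicate_iff]
  constructor
  · simp [PySem.List.length_pyRange_one]
  · intro x hx
    simp only [List.mem_map] at hx
    obtain ⟨c, hc, hfc⟩ := hx
    rw [PySem.List.mem_pyRange_one] at hc
    rw [← hfc]; exact h c hc.1 hc.2

-- A's interior row (per-cell conditional scan) equals B's segment concatenation.
theorem pv_inner_row (width : Int) (sign : String) :
    (PySem.List.pyRange 0 (width - 1) 1).foldl (fun r column =>
      if column == 0 || column == 150 || column == 198 then r ++ ["#"] else r ++ [sign]) [] =
      pvInterior (max (width - 1) 0) sign := by
  have hfun : (fun (r : List String) (column : Int) =>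
      if column == 0 || column == 150 || column == 198 then r ++ ["#"] else r ++ [sign]) =
      fun r column => r ++ [if column == 0 || column == 150 || column == 198 then "#" else sign] := by
    funext r c; split_ifs <;> rfl
  rw [hfun, PySem.List.foldl_append_singleton_eq_map]
  simp only [List.nil_append]
  set n : Int := max (width - 1) 0 with hn
  have hn0 : 0 ≤ n := le_max_right _ _
  have hrange : PySem.List.pyRange 0 (width - 1) 1 = PySem.List.pyRange 0 n 1 := by
    by_cases h : width - 1 ≤ 0
    · rw [PySem.List.pyRange_one_eq_nil h, PySem.List.pyRange_one_eq_nil (by omega)]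
    · congr 1; omega
  rw [hrange,
      PySem.List.pyRange_one_append 0 (min n 1) n (by omega) (by omega),
      PySem.List.pyRange_one_append (min n 1) (min n 150) n (by omega) (by omega),
      PySem.List.pyRange_one_append (min n 150) (min n 151) n (by omega) (by omega),
      PySem.List.pyRange_one_append (min n 151) (min n 198) n (by omega) (by omega),
      PySem.List.pyRange_one_append (min n 198) (min n 199) n (by omega) (by omega)]
  simp only [List.map_append]
  rw [pv_map_const 0 (min n 1) _ "#" (by
        intro c h1 h2
        have hc : c = 0 := by omega
        simp [hc]),
      pv_map_const (min n 1) (min n 150) _ sign (by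
        intro c h1 h2
        have hne : c ≠ 0 ∧ c ≠ 150 ∧ c ≠ 198 := by omega
        simp [hne.1, hne.2.1, hne.2.2]),
      pv_map_const (min n 150) (min n 151) _ "#" (by
        intro c h1 h2
        have hc : c = 150 := by omega
        simp [hc]),
      pv_map_const (min n 151) (min n 198) _ sign (by
        intro c h1 h2
        have hne : c ≠ 0 ∧ c ≠ 150 ∧ c ≠ 198 := by omega
        simp [hne.1, hne.2.1, hne.2.2]),
      pv_map_const (min n 198) (min n 199) _ "#" (by
        intro c h1 h2
        have hc : c = 198 := by omega
        simp [hc]),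
      pv_map_const (min n 199) n _ sign (by
        intro c h1 h2
        have hne : c ≠ 0 ∧ c ≠ 150 ∧ c ≠ 198 := by omega
        simp [hne.1, hne.2.1, hne.2.2])]
  have e1 : (if 0 < n then ["#"] else ([] : List String)) =
      List.replicate (min n 1 - 0).toNat "#" := by
    split_ifs with h
    · rw [show (min n 1 - 0).toNat = 1 by omega]; rfl
    · rw [show (min n 1 - 0).toNat = 0 by omega]; rfl
  have e2 : pvSeg n sign 1 150 = List.replicate (min n 150 - min n 1).toNat sign := by
    unfold pvSeg; congr 1; omega
  have e3 : (if 150 < n then ["#"] else ([] : List String)) =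
      List.replicate (min n 151 - min n 150).toNat "#" := by
    split_ifs with h
    · rw [show (min n 151 - min n 150).toNat = 1 by omega]; rfl
    · rw [show (min n 151 - min n 150).toNat = 0 by omega]; rfl
  have e4 : pvSeg n sign 151 198 = List.replicate (min n 198 - min n 151).toNat sign := by
    unfold pvSeg; congr 1; omega
  have e5 : (if 198 < n then ["#"] else ([] : List String)) =
      List.replicate (min n 199 - min n 198).toNat "#" := by
    split_ifs with h
    · rw [show (min n 199 - min n 198).toNat = 1 by omega]; rfl
    · rw [show (min n 199 - min n 198).toNat = 0 by omega]; rfl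
  have e6 : pvSeg n sign 199 n = List.replicate (n - min n 199).toNat sign := by
    unfold pvSeg; congr 1; omega
  rw [pvInterior, e1, e2, e3, e4, e5, e6]
  simp [List.append_assoc]

-- each row of A is border or interior depending only on the row index
theorem pv_row_eq (width height : Int) (sign : String) (row : Int) :
    (PySem.List.pyRange 0 (width - 1) 1).foldl (fun item_in_row column =>
      if row == 0 || row == height - 1 then item_in_row ++ ["#"]
      else if column == 0 || column == 150 || column == 198 then item_in_row ++ ["#"]
      else item_in_row ++ [sign]) [] =
    (if row == 0 || row == height - 1 then List.replicate (max (width - 1) 0).toNat "#"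
     else pvInterior (max (width - 1) 0) sign) := by
  by_cases hb : (row == 0 || row == height - 1) = true
  · simp only [hb, if_true]
    exact pv_border_row width
  · simp only [hb, if_false, Bool.false_eq_true]
    exact pv_inner_row width sign

-- ===== VERDICT (by name: the statement is the Claim_ definition above) =====
theorem create_first_board_spec : Claim_equal_create_first_board := by
  intro width height sign _
  unfold Spec_create_first_board create_first_board create_first_board_alt
  rw [PySem.List.foldl_append_singleton_eq_map]
  simp only [List.nil_append]
  have hrows : (PySem.List.pyRange 0 height 1).map (fun row =>
      (PySem.List.pyRange 0 (width - 1) 1).foldl (fun item_in_row column =>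
        if row == 0 || row == height - 1 then item_in_row ++ ["#"]
        else if column == 0 || column == 150 || column == 198 then item_in_row ++ ["#"]
        else item_in_row ++ [sign]) []) =
      (PySem.List.pyRange 0 height 1).map (fun row =>
        if row == 0 || row == height - 1 then List.replicate (max (width - 1) 0).toNat "#"
        else pvInterior (max (width - 1) 0) sign) :=
    List.map_congr_left (fun row _ => pv_row_eq width height sign row)
  rw [hrows]
  by_cases h0 : height ≤ 0
  · simp [PySem.List.pyRange_one_eq_nil h0, h0]
  · by_cases h1 : height = 1
    · subst h1
      simp [PySem.List.pyRange_one_cons, PySem.List.pyRange_one_eq_nil, show (0:Int) < 1 by norm_num]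
    · have h2 : (2:Int) ≤ height := by omega
      simp only [if_neg h0, if_neg (by simp [h1] : ¬ (height == 1) = true)]
      rw [PySem.List.pyRange_one_append 0 1 height (by omega) (by omega),
          PySem.List.pyRange_one_append 1 (height - 1) height (by omega) (by omega)]
      rw [show PySem.List.pyRange 0 1 1 = [0] from PySem.List.pyRange_one_singleton 0]
      rw [show PySem.List.pyRange (height - 1) height 1 = [height - 1] by
            have := PySem.List.pyRange_one_singleton (height - 1)
            simpa using this]
      simp only [List.map_append, List.map_cons, List.map_nil]
      have hmid : (PySem.List.pyRange 1 (height - 1) 1).map (fun row =>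
          if row == 0 || row == height - 1 then List.replicate (max (width - 1) 0).toNat "#"
          else pvInterior (max (width - 1) 0) sign) =
          List.replicate (height - 2).toNat (pvInterior (max (width - 1) 0) sign) := by
        rw [List.eq_replicate_iff]
        constructor
        · simp [PySem.List.length_pyRange_one]; omega
        · intro b hb
          simp only [List.mem_map] at hb
          obtain ⟨row, hrow, hbeq⟩ := hb
          rw [PySem.List.mem_pyRange_one] at hrow
          rw [← hbeq, if_neg]
          simp only [Bool.or_eq_true, beq_iff_eq]
          push_neg
          omega
      rw [hmid]
      simp
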